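-- pv_equiv track=rewrite | github.com/vslch/codility-solutions | rhodium2019.py | solution
-- ===== SOURCE A (Python) =====
-- def solution(T):
--
--     N = len(T)
--     M = [[0] * N for _ in T]
--
--     for i, v in enumerate(T):
--         if i == v:
--             continue
--         r = min(i, v)
--         c = max(i, v)
--         M[r][c] = 1
--
--     for i in range(N):
--         for j in range(1, N):
--             M[i][j] += M[i][j - 1]
--
--     for i in range(N - 2, -1, -1):
--         for j in range(N):
--             M[i][j] += M[i + 1][j]
--
--     c = N
--
--     for i in range(N - 1):
--         for j in range(i + 1, N):
--             if M[i][j] == j - i: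
--                 c += 1
--
--     return c
-- ===== SOURCE B (Python) =====
-- def solution(T):
--     N = len(T)
--     marked = [[False] * N for _ in range(N)]
--     for i, v in enumerate(T):
--         if i != v:
--             marked[min(i, v)][max(i, v)] = True
--     in_row = [1 if marked[r][0] else 0 for r in range(N)]  # marks in row r with column <= j
--     count = N
--     for j in range(1, N):
--         for r in range(N):
--             if marked[r][j]:
--                 in_row[r] += 1
--         cnt = 0
--         for i in range(N - 1, -1, -1):
--             cnt += in_row[i]
--             if i < j and cnt == j - i:
--                 count += 1
--     return count
-- ===== Notes on version B (the rewrite author's own statement) =====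
-- stated objective: alternative
-- what changed: B drops A's row-prefix-sum and column-suffix-sum passes and the per-pair matrix probe: it keeps a boolean mark matrix, per-row running counters updated one column at a time, and for each right endpoint j a single bottom-up sweep with a running quadrant count compared to the interval length.
import Mathlib
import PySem

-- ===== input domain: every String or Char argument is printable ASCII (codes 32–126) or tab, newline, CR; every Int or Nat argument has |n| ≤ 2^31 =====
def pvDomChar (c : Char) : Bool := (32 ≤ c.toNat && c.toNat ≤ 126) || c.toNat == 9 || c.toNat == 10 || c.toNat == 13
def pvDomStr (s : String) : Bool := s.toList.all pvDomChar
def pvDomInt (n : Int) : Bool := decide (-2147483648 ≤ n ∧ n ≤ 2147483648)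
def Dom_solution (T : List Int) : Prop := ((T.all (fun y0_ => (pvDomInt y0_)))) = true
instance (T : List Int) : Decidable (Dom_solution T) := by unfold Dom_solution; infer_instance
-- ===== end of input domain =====

-- B replaces A's integer matrix with its row-prefix-sum and column-suffix-sum passes by a boolean
-- mark matrix, per-row running counters updated column by column, and a bottom-up sweep per right
-- endpoint (alternative decomposition, same O(n^2) cost).

-- ===== PORT A =====
def solution (T : List Int) : Int :=
  let N : Int := PySem.List.len T
  let M0 : List (List Int) := T.map (fun _ => PySem.List.pyRepeat [(0 : Int)] N)
  let M1 : List (List Int) := (PySem.List.enumerate T 0).foldl (fun M iv =>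
    if iv.1 == iv.2 then M
    else
      let r := min iv.1 iv.2
      let c := max iv.1 iv.2
      PySem.List.pySetD M r (PySem.List.pySetD (PySem.List.pyGetD M r []) c 1)) M0
  let M2 : List (List Int) := (PySem.List.pyRange 0 N 1).foldl (fun M i =>
    (PySem.List.pyRange 1 N 1).foldl (fun M j =>
      PySem.List.pySetD M i (PySem.List.pySetD (PySem.List.pyGetD M i []) j
        (PySem.List.pyGetD (PySem.List.pyGetD M i []) j 0 +
         PySem.List.pyGetD (PySem.List.pyGetD M i []) (j - 1) 0))) M) M1
  let M3 : List (List Int) := (PySem.List.pyRange (N - 2) (-1) (-1)).foldl (fun M i =>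
    (PySem.List.pyRange 0 N 1).foldl (fun M j =>
      PySem.List.pySetD M i (PySem.List.pySetD (PySem.List.pyGetD M i []) j
        (PySem.List.pyGetD (PySem.List.pyGetD M i []) j 0 +
         PySem.List.pyGetD (PySem.List.pyGetD M (i + 1) []) j 0))) M) M2
  (PySem.List.pyRange 0 (N - 1) 1).foldl (fun c i =>
    (PySem.List.pyRange (i + 1) N 1).foldl (fun c j =>
      if PySem.List.pyGetD (PySem.List.pyGetD M3 i []) j 0 == j - i then c + 1 else c) c) N

-- ===== PORT B =====
def solution_alt (T : List Int) : Int :=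
  let N : Int := PySem.List.len T
  let mk0 : List (List Bool) := (PySem.List.pyRange 0 N 1).map
    (fun _ => PySem.List.pyRepeat [false] N)
  let marked : List (List Bool) := (PySem.List.enumerate T 0).foldl (fun mk iv =>
    if iv.1 ≠ iv.2 then
      PySem.List.pySetD mk (min iv.1 iv.2)
        (PySem.List.pySetD (PySem.List.pyGetD mk (min iv.1 iv.2) []) (max iv.1 iv.2) true)
    else mk) mk0
  let inRow0 : List Int := (PySem.List.pyRange 0 N 1).map
    (fun r => if PySem.List.pyGetD (PySem.List.pyGetD marked r []) 0 false then 1 else 0)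
  ((PySem.List.pyRange 1 N 1).foldl (fun st j =>
    let w : List Int := (PySem.List.pyRange 0 N 1).foldl (fun w r =>
      if PySem.List.pyGetD (PySem.List.pyGetD marked r []) j false then
        PySem.List.pySetD w r (PySem.List.pyGetD w r 0 + 1)
      else w) st.1
    let res := (PySem.List.pyRange (N - 1) (-1) (-1)).foldl (fun p i =>
      let cnt : Int := p.1 + PySem.List.pyGetD w i 0
      (cnt, if i < j ∧ cnt = j - i then p.2 + 1 else p.2)) ((0 : Int), st.2)
    (w, res.2)) (inRow0, N)).2

-- ===== PRECONDITION & SPEC =====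
-- Pre_ excludes exactly the inputs on which A raises IndexError: some entry outside [-len(T), len(T)).
def Pre_solution (T : List Int) : Prop :=
  ∀ v ∈ T, -(T.length : Int) ≤ v ∧ v < (T.length : Int)
instance (T : List Int) : Decidable (Pre_solution T) := by unfold Pre_solution; infer_instance
def pvWitness_solution : List Int := [1, 0, -1, 3]

def Spec_solution (T : List Int) (out : Int) : Prop := out = solution_alt T
instance (T : List Int) (out : Int) : Decidable (Spec_solution T out) := by unfold Spec_solution; infer_instance

-- ===== CLAIM (what is proved, stated in full; the proofs are below) =====
def Claim_equal_solution : Prop := ∀ (T : List Int), Dom_solution T → Pre_solution T → Spec_solution T (solution T)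

-- ===== LEMMAS AND PROOFS =====

def pvCell {α : Type} (d : α) (M : List (List α)) (i j : Int) : α :=
  PySem.List.pyGetD (PySem.List.pyGetD M i []) j d

def pvSh {α : Type} (n : Nat) (M : List (List α)) : Prop :=
  M.length = n ∧ ∀ row ∈ M, row.length = n

theorem pvGetD_neg {α : Type} (M : List α) (d : α) (i : Int)
    (h0 : -(M.length : Int) ≤ i) (h1 : i < 0) :
    PySem.List.pyGetD M i d = PySem.List.pyGetD M (i + M.length) d := by
  have h2 : ¬ (0 ≤ i) := by omega
  have h3 : (0:Int) ≤ i + M.length := by omega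
  have h4 : i + (M.length:Int) < M.length := by omega
  have h5 : M.length - (-i).toNat = (i + M.length).toNat := by omega
  simp only [PySem.List.pyGetD, PySem.List.pyGet?, PySem.List.pyIdx?,
    if_neg h2, if_pos h0, if_pos h3, if_pos h4, h5, Option.bind_some]

theorem pvSetD_neg {α : Type} (M : List α) (i : Int) (r : α)
    (h0 : -(M.length : Int) ≤ i) (h1 : i < 0) :
    PySem.List.pySetD M i r = PySem.List.pySetD M (i + M.length) r := by
  have h2 : ¬ (0 ≤ i) := by omega
  have h3 : (0:Int) ≤ i + M.length := by omega
  have h4 : i + (M.length:Int) < M.length := by omega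
  have h5 : M.length - (-i).toNat = (i + M.length).toNat := by omega
  simp only [PySem.List.pySetD, PySem.List.pySet?, PySem.List.pyIdx?,
    if_neg h2, if_pos h0, if_pos h3, if_pos h4, h5]

theorem pvSh_set {α : Type} {n : Nat} (d : α) (M : List (List α)) (hSh : pvSh n M) (i j : Int) (x : α)
    (hi0 : 0 ≤ i) (hi1 : i < n) (hj0 : 0 ≤ j) :
    pvSh n (PySem.List.pySetD M i (PySem.List.pySetD (PySem.List.pyGetD M i []) j x)) := by
  obtain ⟨hlen, hrow⟩ := hSh
  have hi1' : i < (M.length : Int) := by omega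
  rw [PySem.List.pySetD_of_nonneg _ _ hi0, PySem.List.pyGetD_eq_getElem _ _ hi0 hi1',
    PySem.List.pySetD_of_nonneg _ _ hj0]
  constructor
  · simpa using hlen
  · intro row hmem
    rcases List.mem_or_eq_of_mem_set hmem with h | h
    · exact hrow _ h
    · subst h
      simp [hrow _ (List.getElem_mem _)]

theorem pvCell_set {α : Type} {n : Nat} (d : α) (M : List (List α)) (hSh : pvSh n M)
    (i j : Int) (x : α) (a b : Int)
    (hi0 : 0 ≤ i) (hi1 : i < n) (hj0 : 0 ≤ j) (hj1 : j < n)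
    (ha0 : 0 ≤ a) (ha1 : a < n) (hb0 : 0 ≤ b) (hb1 : b < n) :
    pvCell d (PySem.List.pySetD M i (PySem.List.pySetD (PySem.List.pyGetD M i []) j x)) a b
      = if a = i ∧ b = j then x else pvCell d M a b := by
  obtain ⟨hlen, hrow⟩ := hSh
  have hi1' : i < (M.length : Int) := by omega
  have ha1' : a < (M.length : Int) := by omega
  have hrowlen : ∀ k : Nat, (h : k < M.length) → M[k].length = n := fun k h => hrow _ (List.getElem_mem _)
  rw [PySem.List.pySetD_of_nonneg _ _ hi0, PySem.List.pyGetD_eq_getElem _ _ hi0 hi1',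
    PySem.List.pySetD_of_nonneg _ _ hj0]
  unfold pvCell
  have hlen2 : ((M.set i.toNat (M[i.toNat].set j.toNat x)).length : Int) = (M.length : Int) := by simp
  rw [PySem.List.pyGetD_eq_getElem _ _ ha0 (by omega), PySem.List.pyGetD_eq_getElem _ _ ha0 ha1']
  rw [List.getElem_set]
  by_cases hai : i.toNat = a.toNat
  · have hae : a = i := by omega
    rw [if_pos hai]
    simp only [hae]
    have hjlt : j.toNat < M[i.toNat].length := by rw [hrowlen _ (by omega)]; omega
    have hblt : b < (M[i.toNat].length : Int) := by rw [hrowlen _ (by omega)]; omega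
    have hblt2 : b < ((M[i.toNat].set j.toNat x).length : Int) := by simpa using hblt
    rw [PySem.List.pyGetD_eq_getElem _ _ hb0 hblt2, PySem.List.pyGetD_eq_getElem _ _ hb0 hblt]
    rw [List.getElem_set]
    by_cases hbj : j.toNat = b.toNat
    · have hbe : b = j := by omega
      rw [if_pos hbj, if_pos ⟨trivial, hbe⟩]
    · have hbe : ¬ (b = j) := by omega
      rw [if_neg hbj, if_neg (by tauto)]
  · have hne : ¬ (a = i) := by omega
    rw [if_neg hai, if_neg (by tauto)]

theorem pvRow_set {α : Type} (L : List α) (d : α) (c b : Int) (v : α)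
    (hc0 : 0 ≤ c) (hb0 : 0 ≤ b) (hb1 : b < L.length) :
    PySem.List.pyGetD (PySem.List.pySetD L c v) b d
      = if b = c then v else PySem.List.pyGetD L b d := by
  rw [PySem.List.pySetD_of_nonneg _ _ hc0]
  have hb1' : b < ((L.set c.toNat v).length : Int) := by simpa using hb1
  rw [PySem.List.pyGetD_eq_getElem _ _ hb0 hb1', PySem.List.pyGetD_eq_getElem _ _ hb0 hb1]
  rw [List.getElem_set]
  by_cases h : c.toNat = b.toNat
  · rw [if_pos h, if_pos (by omega)]
  · rw [if_neg h, if_neg (by omega)]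

def pvFoldA : List (List Int) → (Int × Int) → List (List Int) := fun M iv =>
  if iv.1 == iv.2 then M
  else
    let r := min iv.1 iv.2
    let c := max iv.1 iv.2
    PySem.List.pySetD M r (PySem.List.pySetD (PySem.List.pyGetD M r []) c 1)

def pvFoldB : List (List Bool) → (Int × Int) → List (List Bool) := fun mk iv =>
  if iv.1 ≠ iv.2 then
    PySem.List.pySetD mk (min iv.1 iv.2)
      (PySem.List.pySetD (PySem.List.pyGetD mk (min iv.1 iv.2) []) (max iv.1 iv.2) true)
  else mk

theorem pvStage1 (n : Nat) (hn : 0 < n) :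
    ∀ (l : List (Int × Int)) (M : List (List Int)) (mk : List (List Bool)),
    pvSh n M → pvSh n mk →
    (∀ iv ∈ l, 0 ≤ iv.1 ∧ iv.1 < (n : Int) ∧ -(n : Int) ≤ iv.2 ∧ iv.2 < (n : Int)) →
    (∀ a b : Int, 0 ≤ a → a < (n : Int) → 0 ≤ b → b < (n : Int) →
       pvCell 0 M a b = if pvCell false mk a b then 1 else 0) →
    pvSh n (l.foldl pvFoldA M) ∧ pvSh n (l.foldl pvFoldB mk) ∧
    (∀ a b : Int, 0 ≤ a → a < (n : Int) → 0 ≤ b → b < (n : Int) →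
       pvCell 0 (l.foldl pvFoldA M) a b = if pvCell false (l.foldl pvFoldB mk) a b then 1 else 0) := by
  intro l
  induction l with
  | nil => intro M mk h1 h2 _ h4; exact ⟨h1, h2, h4⟩
  | cons iv t ih =>
    intro M mk hSh hShB hl hcell
    obtain ⟨hiv, hlt⟩ : _ ∧ _ := ⟨hl iv (List.mem_cons_self), fun x hx => hl x (List.mem_cons_of_mem _ hx)⟩
    simp only [List.foldl_cons]
    by_cases heq : iv.1 = iv.2
    · have hA : pvFoldA M iv = M := by simp [pvFoldA, heq]
      have hB : pvFoldB mk iv = mk := by simp [pvFoldB, heq]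
      simp only [hA, hB]
      exact ih M mk hSh hShB hlt hcell
    · set r : Int := min iv.1 iv.2 with hr
      set c : Int := max iv.1 iv.2 with hc
      have hr0 : -(n : Int) ≤ r := by rw [hr]; omega
      have hr1 : r < (n : Int) := by rw [hr]; omega
      have hc0 : 0 ≤ c := by rw [hc]; omega
      have hc1 : c < (n : Int) := by rw [hc]; omega
      set r' : Int := if r < 0 then r + n else r with hr'
      have hr'0 : 0 ≤ r' := by rw [hr']; split_ifs <;> omega
      have hr'1 : r' < (n : Int) := by rw [hr']; split_ifs <;> omega
      have hMlen : (M.length : Int) = (n : Int) := by exact_mod_cast congrArg Nat.cast hSh.1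
      have hBlen : (mk.length : Int) = (n : Int) := by exact_mod_cast congrArg Nat.cast hShB.1
      have hA : pvFoldA M iv
          = PySem.List.pySetD M r' (PySem.List.pySetD (PySem.List.pyGetD M r' []) c 1) := by
        simp only [pvFoldA, beq_iff_eq, if_neg heq]
        by_cases hneg : r < 0
        · rw [pvSetD_neg M r _ (by omega) hneg, pvGetD_neg M [] r (by omega) hneg]
          rw [hr']
          simp only [if_pos hneg, hMlen]
          rw [hc]
        · have : r' = r := by rw [hr', if_neg hneg]
          rw [this, hr, hc]
      have hB : pvFoldB mk iv
          = PySem.List.pySetD mk r' (PySem.List.pySetD (PySem.List.pyGetD mk r' []) c true) := by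
        simp only [pvFoldB, if_pos heq]
        by_cases hneg : r < 0
        · rw [show min iv.1 iv.2 = r from hr.symm,
            pvSetD_neg mk r _ (by omega) hneg, pvGetD_neg mk [] r (by omega) hneg]
          rw [hr']
          simp only [if_pos hneg, hBlen]
          rw [hc]
        · have : r' = r := by rw [hr', if_neg hneg]
          rw [this, hr, hc]
      simp only [hA, hB]
      have hSh' : pvSh n (PySem.List.pySetD M r' (PySem.List.pySetD (PySem.List.pyGetD M r' []) c 1)) :=
        pvSh_set 0 M hSh r' c 1 hr'0 hr'1 hc0
      have hShB' : pvSh n (PySem.List.pySetD mk r' (PySem.List.pySetD (PySem.List.pyGetD mk r' []) c true)) :=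
        pvSh_set false mk hShB r' c true hr'0 hr'1 hc0
      refine ih _ _ hSh' hShB' hlt ?_
      intro a b ha0 ha1 hb0 hb1
      rw [pvCell_set 0 M hSh r' c 1 a b hr'0 hr'1 hc0 hc1 ha0 ha1 hb0 hb1,
        pvCell_set false mk hShB r' c true a b hr'0 hr'1 hc0 hc1 ha0 ha1 hb0 hb1]
      by_cases hab : a = r' ∧ b = c
      · rw [if_pos hab, if_pos hab]
        simp
      · rw [if_neg hab, if_neg hab]
        exact hcell a b ha0 ha1 hb0 hb1

def pvQ1 (mk : List (List Bool)) (a b : Int) : Int :=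
  (((PySem.List.pyRange 0 (b + 1) 1).countP (fun c => pvCell false mk a c) : Nat) : Int)

def pvInd (mk : List (List Bool)) (a b : Int) : Int :=
  if pvCell false mk a b then 1 else 0

theorem pvQ1_rec (mk : List (List Bool)) (a b : Int) (hb : 0 ≤ b) :
    pvQ1 mk a b = pvQ1 mk a (b - 1) + pvInd mk a b := by
  unfold pvQ1 pvInd
  rw [show b + 1 = (b - 1 + 1) + 1 from by omega,
    PySem.List.pyRange_one_succ_right (by omega : (0 : Int) ≤ b - 1 + 1),
    List.countP_append]
  rw [show b - 1 + 1 = b from by omega]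
  cases h : pvCell false mk a b <;> simp [h, List.countP_cons]

theorem pvQ1_base (mk : List (List Bool)) (a : Int) :
    pvQ1 mk a 0 = pvInd mk a 0 := by
  unfold pvQ1 pvInd
  rw [PySem.List.pyRange_one_singleton]
  cases h : pvCell false mk a 0 <;> simp [h, List.countP_cons]

def pvQ2 (mk : List (List Bool)) (n : Int) (a b : Int) : Int :=
  ((PySem.List.pyRange a n 1).map (fun r => pvQ1 mk r b)).sum

theorem pvQ2_rec_row (mk : List (List Bool)) (n : Int) (a b : Int) (h : a < n) :
    pvQ2 mk n a b = pvQ1 mk a b + pvQ2 mk n (a + 1) b := by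
  unfold pvQ2
  rw [PySem.List.pyRange_one_cons h]
  simp

theorem pvQ2_empty (mk : List (List Bool)) (n : Int) (a b : Int) (h : n ≤ a) :
    pvQ2 mk n a b = 0 := by
  unfold pvQ2
  rw [PySem.List.pyRange_one_eq_nil h]
  simp

theorem pvQ2_top (mk : List (List Bool)) (n : Int) (a b : Int) (h : a = n - 1) :
    pvQ2 mk n a b = pvQ1 mk a b := by
  rw [pvQ2_rec_row mk n a b (by omega), pvQ2_empty mk n (a + 1) b (by omega)]
  omega

def pvBody2 (i : Int) : List (List Int) → Int → List (List Int) := fun M j =>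
  PySem.List.pySetD M i (PySem.List.pySetD (PySem.List.pyGetD M i []) j
    (PySem.List.pyGetD (PySem.List.pyGetD M i []) j 0 +
     PySem.List.pyGetD (PySem.List.pyGetD M i []) (j - 1) 0))

theorem pvInner2 (n : Nat) (mk : List (List Bool)) (F : Int → Int → Int) (i : Int)
    (hi0 : 0 ≤ i) (hi1 : i < (n : Int)) :
    ∀ (d : Nat) (k : Int), ((n : Int) - k).toNat = d → 1 ≤ k → ∀ M, pvSh n M →
    (∀ a b : Int, 0 ≤ a → a < (n : Int) → 0 ≤ b → b < (n : Int) →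
      pvCell 0 M a b = if a = i then (if b < k then pvQ1 mk i b else pvInd mk i b) else F a b) →
    pvSh n ((PySem.List.pyRange k n 1).foldl (pvBody2 i) M) ∧
    (∀ a b : Int, 0 ≤ a → a < (n : Int) → 0 ≤ b → b < (n : Int) →
      pvCell 0 ((PySem.List.pyRange k n 1).foldl (pvBody2 i) M) a b
        = if a = i then pvQ1 mk i b else F a b) := by
  intro d
  induction d with
  | zero =>
    intro k hk hk1 M hSh hinv
    have hempty : PySem.List.pyRange k n 1 = [] := PySem.List.pyRange_one_eq_nil (by omega)
    rw [hempty]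
    simp only [List.foldl_nil]
    refine ⟨hSh, ?_⟩
    intro a b ha0 ha1 hb0 hb1
    rw [hinv a b ha0 ha1 hb0 hb1]
    by_cases h1 : a = i
    · rw [if_pos h1, if_pos h1, if_pos (by omega : b < k)]
    · rw [if_neg h1, if_neg h1]
  | succ d ih =>
    intro k hk hk1 M hSh hinv
    have hklt : k < (n : Int) := by omega
    rw [PySem.List.pyRange_one_cons hklt]
    simp only [List.foldl_cons]
    have hM' : pvBody2 i M k
        = PySem.List.pySetD M i (PySem.List.pySetD (PySem.List.pyGetD M i []) k
            (pvCell 0 M i k + pvCell 0 M i (k - 1))) := rfl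
    have hSh' : pvSh n (pvBody2 i M k) := by
      rw [hM']; exact pvSh_set 0 M hSh i k _ hi0 hi1 (by omega)
    have hcellk : pvCell 0 M i k = pvInd mk i k := by
      rw [hinv i k hi0 hi1 (by omega) hklt]; simp
    have hcellk1 : pvCell 0 M i (k - 1) = pvQ1 mk i (k - 1) := by
      rw [hinv i (k - 1) hi0 hi1 (by omega) (by omega), if_pos rfl,
        if_pos (by omega : k - 1 < k)]
    have hnew : ∀ a b : Int, 0 ≤ a → a < (n : Int) → 0 ≤ b → b < (n : Int) →
        pvCell 0 (pvBody2 i M k) a b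
          = if a = i then (if b < k + 1 then pvQ1 mk i b else pvInd mk i b) else F a b := by
      intro a b ha0 ha1 hb0 hb1
      rw [hM', pvCell_set 0 M hSh i k _ a b hi0 hi1 (by omega) hklt ha0 ha1 hb0 hb1]
      by_cases h1 : a = i ∧ b = k
      · obtain ⟨ha, hb⟩ := h1
        rw [if_pos ⟨ha, hb⟩, if_pos ha, hb, if_pos (by omega : k < k + 1),
          hcellk, hcellk1, pvQ1_rec mk i k (by omega)]
        omega
      · rw [if_neg h1, hinv a b ha0 ha1 hb0 hb1]
        by_cases h3 : a = i
        · rw [if_pos h3, if_pos h3]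
          have hbk : ¬ b = k := fun hbe => h1 ⟨h3, hbe⟩
          by_cases h4 : b < k
          · rw [if_pos h4, if_pos (by omega : b < k + 1)]
          · rw [if_neg h4, if_neg (by omega : ¬ b < k + 1)]
        · rw [if_neg h3, if_neg h3]
    exact ih (k + 1) (by omega) (by omega) _ hSh' hnew

theorem pvOuter2 (n : Nat) (mk : List (List Bool)) :
    ∀ (d : Nat) (k : Int), ((n : Int) - k).toNat = d → 0 ≤ k → ∀ M, pvSh n M →
    (∀ a b : Int, 0 ≤ a → a < (n : Int) → 0 ≤ b → b < (n : Int) →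
      pvCell 0 M a b = if a < k then pvQ1 mk a b else pvInd mk a b) →
    pvSh n ((PySem.List.pyRange k n 1).foldl
        (fun M i => (PySem.List.pyRange 1 n 1).foldl (pvBody2 i) M) M) ∧
    (∀ a b : Int, 0 ≤ a → a < (n : Int) → 0 ≤ b → b < (n : Int) →
      pvCell 0 ((PySem.List.pyRange k n 1).foldl
        (fun M i => (PySem.List.pyRange 1 n 1).foldl (pvBody2 i) M) M) a b = pvQ1 mk a b) := by
  intro d
  induction d with
  | zero =>
    intro k hk hk0 M hSh hinv
    have hempty : PySem.List.pyRange k n 1 = [] := PySem.List.pyRange_one_eq_nil (by omega)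
    rw [hempty]
    simp only [List.foldl_nil]
    refine ⟨hSh, ?_⟩
    intro a b ha0 ha1 hb0 hb1
    rw [hinv a b ha0 ha1 hb0 hb1, if_pos (by omega)]
  | succ d ih =>
    intro k hk hk0 M hSh hinv
    have hklt : k < (n : Int) := by omega
    rw [PySem.List.pyRange_one_cons hklt]
    simp only [List.foldl_cons]
    have hpre : ∀ a b : Int, 0 ≤ a → a < (n : Int) → 0 ≤ b → b < (n : Int) →
        pvCell 0 M a b = if a = k then (if b < 1 then pvQ1 mk k b else pvInd mk k b)
          else (if a < k then pvQ1 mk a b else pvInd mk a b) := by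
      intro a b ha0 ha1 hb0 hb1
      rw [hinv a b ha0 ha1 hb0 hb1]
      by_cases h2 : a = k
      · rw [if_neg (by omega : ¬ a < k), if_pos h2]
        by_cases hb : b < 1
        · have hb0' : b = 0 := by omega
          rw [if_pos hb, hb0', h2]
          exact (pvQ1_base mk k).symm
        · rw [if_neg hb, h2]
      · rw [if_neg h2]
    obtain ⟨hSh', hcell'⟩ := pvInner2 n mk
        (fun a b => if a < k then pvQ1 mk a b else pvInd mk a b) k hk0 hklt
        ((n : Int) - 1).toNat 1 (by omega) (by omega) M hSh hpre
    refine ih (k + 1) (by omega) (by omega) _ hSh' ?_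
    intro a b ha0 ha1 hb0 hb1
    rw [hcell' a b ha0 ha1 hb0 hb1]
    by_cases h1 : a = k
    · rw [if_pos h1, if_pos (by omega : a < k + 1), h1]
    · rw [if_neg h1]
      by_cases h2 : a < k
      · rw [if_pos h2, if_pos (by omega : a < k + 1)]
      · rw [if_neg h2, if_neg (by omega : ¬ a < k + 1)]

def pvBody3 (i : Int) : List (List Int) → Int → List (List Int) := fun M j =>
  PySem.List.pySetD M i (PySem.List.pySetD (PySem.List.pyGetD M i []) j
    (PySem.List.pyGetD (PySem.List.pyGetD M i []) j 0 +
     PySem.List.pyGetD (PySem.List.pyGetD M (i + 1) []) j 0))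

theorem pvInner3 (n : Nat) (F : Int → Int → Int) (i : Int)
    (hi0 : 0 ≤ i) (hi1 : i + 1 < (n : Int)) :
    ∀ (d : Nat) (k : Int), ((n : Int) - k).toNat = d → 0 ≤ k → ∀ M, pvSh n M →
    (∀ a b : Int, 0 ≤ a → a < (n : Int) → 0 ≤ b → b < (n : Int) →
      pvCell 0 M a b = if a = i ∧ b < k then F i b + F (i + 1) b else F a b) →
    pvSh n ((PySem.List.pyRange k n 1).foldl (pvBody3 i) M) ∧
    (∀ a b : Int, 0 ≤ a → a < (n : Int) → 0 ≤ b → b < (n : Int) →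
      pvCell 0 ((PySem.List.pyRange k n 1).foldl (pvBody3 i) M) a b
        = if a = i then F i b + F (i + 1) b else F a b) := by
  intro d
  induction d with
  | zero =>
    intro k hk hk0 M hSh hinv
    rw [PySem.List.pyRange_one_eq_nil (by omega)]
    simp only [List.foldl_nil]
    refine ⟨hSh, ?_⟩
    intro a b ha0 ha1 hb0 hb1
    rw [hinv a b ha0 ha1 hb0 hb1]
    by_cases h1 : a = i
    · rw [if_pos ⟨h1, by omega⟩, if_pos h1]
    · rw [if_neg (fun h => h1 h.1), if_neg h1]
  | succ d ih =>
    intro k hk hk0 M hSh hinv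
    have hklt : k < (n : Int) := by omega
    rw [PySem.List.pyRange_one_cons hklt]
    simp only [List.foldl_cons]
    have hM' : pvBody3 i M k
        = PySem.List.pySetD M i (PySem.List.pySetD (PySem.List.pyGetD M i []) k
            (pvCell 0 M i k + pvCell 0 M (i + 1) k)) := rfl
    have hSh' : pvSh n (pvBody3 i M k) := by
      rw [hM']; exact pvSh_set 0 M hSh i k _ hi0 (by omega) hk0
    have hik : pvCell 0 M i k = F i k := by
      rw [hinv i k hi0 (by omega) hk0 hklt, if_neg (by omega : ¬ (i = i ∧ k < k))]
    have hik1 : pvCell 0 M (i + 1) k = F (i + 1) k := by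
      rw [hinv (i + 1) k (by omega) (by omega) hk0 hklt,
        if_neg (by omega : ¬ (i + 1 = i ∧ k < k))]
    have hnew : ∀ a b : Int, 0 ≤ a → a < (n : Int) → 0 ≤ b → b < (n : Int) →
        pvCell 0 (pvBody3 i M k) a b
          = if a = i ∧ b < k + 1 then F i b + F (i + 1) b else F a b := by
      intro a b ha0 ha1 hb0 hb1
      rw [hM', pvCell_set 0 M hSh i k _ a b hi0 (by omega) hk0 hklt ha0 ha1 hb0 hb1]
      by_cases h1 : a = i ∧ b = k
      · rw [if_pos h1, if_pos ⟨h1.1, by omega⟩, hik, hik1, h1.2]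
      · rw [if_neg h1, hinv a b ha0 ha1 hb0 hb1]
        by_cases h3 : a = i ∧ b < k
        · rw [if_pos h3, if_pos ⟨h3.1, by omega⟩]
        · have : ¬ (a = i ∧ b < k + 1) := by
            intro h
            rcases Classical.em (b = k) with hb | hb
            · exact h1 ⟨h.1, hb⟩
            · exact h3 ⟨h.1, by omega⟩
          rw [if_neg h3, if_neg this]
    exact ih (k + 1) (by omega) (by omega) _ hSh' hnew

theorem pvOuter3 (n : Nat) (mk : List (List Bool)) :
    ∀ (d : Nat) (k : Int), (k + 1).toNat = d → k ≤ (n : Int) - 2 → ∀ M, pvSh n M →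
    (∀ a b : Int, 0 ≤ a → a < (n : Int) → 0 ≤ b → b < (n : Int) →
      pvCell 0 M a b = if a ≤ k then pvQ1 mk a b else pvQ2 mk n a b) →
    pvSh n ((PySem.List.pyRange k (-1) (-1)).foldl
        (fun M i => (PySem.List.pyRange 0 n 1).foldl (pvBody3 i) M) M) ∧
    (∀ a b : Int, 0 ≤ a → a < (n : Int) → 0 ≤ b → b < (n : Int) →
      pvCell 0 ((PySem.List.pyRange k (-1) (-1)).foldl
        (fun M i => (PySem.List.pyRange 0 n 1).foldl (pvBody3 i) M) M) a b = pvQ2 mk n a b) := by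
  intro d
  induction d with
  | zero =>
    intro k hk hk2 M hSh hinv
    rw [PySem.List.pyRange_neg_one_eq_nil (by omega)]
    simp only [List.foldl_nil]
    refine ⟨hSh, ?_⟩
    intro a b ha0 ha1 hb0 hb1
    rw [hinv a b ha0 ha1 hb0 hb1, if_neg (by omega)]
  | succ d ih =>
    intro k hk hk2 M hSh hinv
    have hk0 : 0 ≤ k := by omega
    rw [PySem.List.pyRange_neg_one_cons (by omega : (-1 : Int) < k)]
    simp only [List.foldl_cons]
    have hpre : ∀ a b : Int, 0 ≤ a → a < (n : Int) → 0 ≤ b → b < (n : Int) →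
        pvCell 0 M a b = if a = k ∧ b < 0 then
            (fun a b => if a ≤ k then pvQ1 mk a b else pvQ2 mk n a b) k b +
            (fun a b => if a ≤ k then pvQ1 mk a b else pvQ2 mk n a b) (k + 1) b
          else (fun a b => if a ≤ k then pvQ1 mk a b else pvQ2 mk n a b) a b := by
      intro a b ha0 ha1 hb0 hb1
      rw [hinv a b ha0 ha1 hb0 hb1, if_neg (by omega : ¬ (a = k ∧ b < 0))]
    obtain ⟨hSh', hcell'⟩ := pvInner3 n
        (fun a b => if a ≤ k then pvQ1 mk a b else pvQ2 mk n a b) k hk0 (by omega)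
        ((n : Int) - 0).toNat 0 (by omega) (by omega) M hSh hpre
    refine ih (k - 1) (by omega) (by omega) _ hSh' ?_
    intro a b ha0 ha1 hb0 hb1
    rw [hcell' a b ha0 ha1 hb0 hb1]
    by_cases h1 : a = k
    · rw [if_pos h1, if_pos (by omega : k ≤ k), if_neg (by omega : ¬ k + 1 ≤ k), h1,
        if_neg (by omega : ¬ k ≤ k - 1)]
      exact (pvQ2_rec_row mk n k b (by omega)).symm
    · rw [if_neg h1]
      by_cases h2 : a ≤ k - 1
      · rw [if_pos (by omega : a ≤ k), if_pos h2]
      · rw [if_neg (by omega : ¬ a ≤ k), if_neg h2]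

theorem pvSum_pyRange (f : Int → Int) :
    ∀ (m : Nat) (a : Int), ((PySem.List.pyRange a (a + m) 1).map f).sum
      = ∑ k ∈ Finset.range m, f (a + k) := by
  intro m
  induction m with
  | zero => intro a; rw [PySem.List.pyRange_one_eq_nil (by omega)]; simp
  | succ m ih =>
    intro a
    have h1 : a + ((m : Int) + 1) = (a + m) + 1 := by ring
    have h2 : (((m + 1 : Nat)) : Int) = (m : Int) + 1 := by push_cast; ring
    rw [h2, h1, PySem.List.pyRange_one_succ_right (by omega : a ≤ a + (m : Int))]
    rw [List.map_append, List.sum_append, ih a, Finset.sum_range_succ]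
    simp

theorem pvCount_pyRange (p : Int → Bool) :
    ∀ (m : Nat) (a : Int), (((PySem.List.pyRange a (a + m) 1).countP p : Nat) : Int)
      = ∑ k ∈ Finset.range m, (if p (a + k) then (1 : Int) else 0) := by
  intro m
  induction m with
  | zero => intro a; rw [PySem.List.pyRange_one_eq_nil (by omega)]; simp
  | succ m ih =>
    intro a
    have h1 : a + ((m : Int) + 1) = (a + m) + 1 := by ring
    have h2 : (((m + 1 : Nat)) : Int) = (m : Int) + 1 := by push_cast; ring
    rw [h2, h1, PySem.List.pyRange_one_succ_right (by omega : a ≤ a + (m : Int))]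
    rw [List.countP_append, Finset.sum_range_succ, Nat.cast_add, ih a]
    cases hp : p (a + (m : Int)) <;> simp [hp, List.countP_cons]

theorem pvCount_shift (p : Int → Bool) (i N : Int) (h0 : 0 ≤ i) (h1 : i + 1 ≤ N) :
    (PySem.List.pyRange (i + 1) N 1).countP p
      = (PySem.List.pyRange 0 N 1).countP (fun j => decide (i < j) && p j) := by
  rw [PySem.List.pyRange_one_append 0 (i + 1) N (by omega) h1, List.countP_append]
  have hz : (PySem.List.pyRange 0 (i + 1) 1).countP (fun j => decide (i < j) && p j) = 0 := by
    rw [List.countP_eq_zero]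
    intro j hj
    have := PySem.List.mem_pyRange_one.1 hj
    simp only [Bool.and_eq_true, decide_eq_true_eq]
    intro h
    omega
  have he : (PySem.List.pyRange (i + 1) N 1).countP (fun j => decide (i < j) && p j)
      = (PySem.List.pyRange (i + 1) N 1).countP p := by
    refine List.countP_congr ?_
    intro j hj
    have := PySem.List.mem_pyRange_one.1 hj
    simp only [Bool.and_eq_true, decide_eq_true_eq]
    constructor
    · intro h; exact h.2
    · intro h; exact ⟨by omega, h⟩
  omega

-- the column-j counter update of B: after it, w holds the counts up to column j
theorem pvUpdateW (n : Nat) (mk : List (List Bool)) (j : Int) (hj : 1 ≤ j) :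
    ∀ (d : Nat) (k : Int), ((n : Int) - k).toNat = d → 0 ≤ k → ∀ (w : List Int), w.length = n →
    (∀ r : Int, 0 ≤ r → r < (n : Int) →
      PySem.List.pyGetD w r 0 = if r < k then pvQ1 mk r j else pvQ1 mk r (j - 1)) →
    ((PySem.List.pyRange k n 1).foldl (fun w r =>
        if PySem.List.pyGetD (PySem.List.pyGetD mk r []) j false then
          PySem.List.pySetD w r (PySem.List.pyGetD w r 0 + 1)
        else w) w).length = n ∧
    (∀ r : Int, 0 ≤ r → r < (n : Int) →
      PySem.List.pyGetD ((PySem.List.pyRange k n 1).foldl (fun w r =>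
        if PySem.List.pyGetD (PySem.List.pyGetD mk r []) j false then
          PySem.List.pySetD w r (PySem.List.pyGetD w r 0 + 1)
        else w) w) r 0 = pvQ1 mk r j) := by
  intro d
  induction d with
  | zero =>
    intro k hk hk0 w hwl hwv
    rw [PySem.List.pyRange_one_eq_nil (by omega)]
    simp only [List.foldl_nil]
    refine ⟨hwl, ?_⟩
    intro r hr0 hr1
    rw [hwv r hr0 hr1, if_pos (by omega)]
  | succ d ih =>
    intro k hk hk0 w hwl hwv
    have hklt : k < (n : Int) := by omega
    rw [PySem.List.pyRange_one_cons hklt]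
    simp only [List.foldl_cons]
    set w' : List Int := if PySem.List.pyGetD (PySem.List.pyGetD mk k []) j false then
        PySem.List.pySetD w k (PySem.List.pyGetD w k 0 + 1)
      else w with hw'
    have hwl' : w'.length = n := by
      rw [hw']
      split_ifs
      · rw [PySem.List.pySetD_of_nonneg _ _ hk0]; simpa using hwl
      · exact hwl
    have hwv' : ∀ r : Int, 0 ≤ r → r < (n : Int) →
        PySem.List.pyGetD w' r 0 = if r < k + 1 then pvQ1 mk r j else pvQ1 mk r (j - 1) := by
      intro r hr0 hr1
      have hrec := pvQ1_rec mk k j (by omega)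
      rw [hw']
      by_cases hm : PySem.List.pyGetD (PySem.List.pyGetD mk k []) j false = true
      · rw [if_pos hm]
        rw [pvRow_set w 0 k r _ hk0 hr0 (by omega)]
        by_cases hrk : r = k
        · rw [if_pos hrk, if_pos (by omega : r < k + 1), hrk,
            hwv k hk0 hklt, if_neg (by omega : ¬ k < k), hrec]
          have : pvInd mk k j = 1 := by unfold pvInd pvCell; rw [if_pos hm]
          omega
        · rw [if_neg hrk, hwv r hr0 hr1]
          by_cases h2 : r < k
          · rw [if_pos h2, if_pos (by omega : r < k + 1)]
          · rw [if_neg h2, if_neg (by omega : ¬ r < k + 1)]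
      · rw [if_neg hm, hwv r hr0 hr1]
        by_cases hrk : r = k
        · rw [hrk, if_neg (by omega : ¬ k < k), if_pos (by omega : k < k + 1), hrec]
          have : pvInd mk k j = 0 := by
            unfold pvInd pvCell
            rw [if_neg hm]
          omega
        · by_cases h2 : r < k
          · rw [if_pos h2, if_pos (by omega : r < k + 1)]
          · rw [if_neg h2, if_neg (by omega : ¬ r < k + 1)]
    exact ih (k + 1) (by omega) (by omega) w' hwl' hwv'

-- B's bottom-up sweep: the running count is the quadrant count
theorem pvInnerB (n : Nat) (mk : List (List Bool)) (w : List Int) (j : Int)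
    (hw : ∀ r : Int, 0 ≤ r → r < (n : Int) → PySem.List.pyGetD w r 0 = pvQ1 mk r j) :
    ∀ (d : Nat) (k : Int), (k + 1).toNat = d → k ≤ (n : Int) - 1 → ∀ (cnt c : Int),
    cnt = pvQ2 mk (n : Int) (k + 1) j →
    ((PySem.List.pyRange k (-1) (-1)).foldl (fun p i =>
        let cnt : Int := p.1 + PySem.List.pyGetD w i 0
        (cnt, if i < j ∧ cnt = j - i then p.2 + 1 else p.2)) (cnt, c)).2
      = c + (((PySem.List.pyRange 0 (k + 1) 1).countP
          (fun i => decide (i < j ∧ pvQ2 mk (n : Int) i j = j - i)) : Nat) : Int) := by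
  intro d
  induction d with
  | zero =>
    intro k hk hkn cnt c hcnt
    rw [PySem.List.pyRange_neg_one_eq_nil (by omega), PySem.List.pyRange_one_eq_nil (by omega)]
    simp
  | succ d ih =>
    intro k hk hkn cnt c hcnt
    have hk0 : 0 ≤ k := by omega
    rw [PySem.List.pyRange_neg_one_cons (by omega : (-1 : Int) < k)]
    simp only [List.foldl_cons]
    have hq2 : cnt + PySem.List.pyGetD w k 0 = pvQ2 mk (n : Int) k j := by
      have h := pvQ2_rec_row mk (n : Int) k j (by omega)
      rw [hw k hk0 (by omega)]
      omega
    rw [PySem.List.pyRange_one_succ_right (by omega : (0 : Int) ≤ k), List.countP_append]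
    have hone : (([k] : List Int)).countP (fun i => decide (i < j ∧ pvQ2 mk (n : Int) i j = j - i))
        = if k < j ∧ pvQ2 mk (n : Int) k j = j - k then 1 else 0 := by
      simp only [List.countP_cons, List.countP_nil]
      by_cases h : k < j ∧ pvQ2 mk (n : Int) k j = j - k
      · rw [if_pos h]; simp [h]
      · rw [if_neg h]; simp [h]
    have := ih (k - 1) (by omega) (by omega)
      (cnt + PySem.List.pyGetD w k 0)
      (if k < j ∧ cnt + PySem.List.pyGetD w k 0 = j - k then c + 1 else c)
      (by rw [hq2]; congr 1; omega)
    simp only [] at this ⊢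
    rw [show k - 1 + 1 = k from by omega] at this
    rw [this, hone]
    by_cases h : k < j ∧ pvQ2 mk (n : Int) k j = j - k
    · rw [if_pos (by rw [hq2]; exact h), if_pos h]
      push_cast
      ring
    · rw [if_neg (by rw [hq2]; exact h), if_neg h]
      push_cast
      ring

-- B's outer loop over right endpoints
theorem pvOuterB (n : Nat) (mk : List (List Bool)) :
    ∀ (d : Nat) (j : Int), ((n : Int) - j).toNat = d → 1 ≤ j →
    ∀ (w : List Int) (c : Int), w.length = n →
    (∀ r : Int, 0 ≤ r → r < (n : Int) → PySem.List.pyGetD w r 0 = pvQ1 mk r (j - 1)) →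
    ((PySem.List.pyRange j (n : Int) 1).foldl (fun st j =>
        let w : List Int := (PySem.List.pyRange 0 (n : Int) 1).foldl (fun w r =>
          if PySem.List.pyGetD (PySem.List.pyGetD mk r []) j false then
            PySem.List.pySetD w r (PySem.List.pyGetD w r 0 + 1)
          else w) st.1
        let res := (PySem.List.pyRange ((n : Int) - 1) (-1) (-1)).foldl (fun p i =>
          let cnt : Int := p.1 + PySem.List.pyGetD w i 0
          (cnt, if i < j ∧ cnt = j - i then p.2 + 1 else p.2)) ((0 : Int), st.2)
        (w, res.2)) (w, c)).2
      = c + ((PySem.List.pyRange j (n : Int) 1).map (fun j' =>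
          (((PySem.List.pyRange 0 (n : Int) 1).countP
            (fun i => decide (i < j' ∧ pvQ2 mk (n : Int) i j' = j' - i)) : Nat) : Int))).sum := by
  intro d
  induction d with
  | zero =>
    intro j hj hj1 w c hwl hwv
    rw [PySem.List.pyRange_one_eq_nil (show (n : Int) ≤ j from by omega)]
    simp
  | succ d ih =>
    intro j hj hj1 w c hwl hwv
    have hjlt : j < (n : Int) := by omega
    obtain ⟨hwl', hwv'⟩ := pvUpdateW n mk j hj1 ((n : Int) - 0).toNat 0 (by omega) (by omega)
      w hwl (by
        intro r hr0 hr1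
        rw [if_neg (by omega : ¬ r < 0)]
        exact hwv r hr0 hr1)
    have hinner := pvInnerB n mk
      ((PySem.List.pyRange 0 (n : Int) 1).foldl (fun w r =>
        if PySem.List.pyGetD (PySem.List.pyGetD mk r []) j false then
          PySem.List.pySetD w r (PySem.List.pyGetD w r 0 + 1)
        else w) w) j hwv'
      ((n : Int) - 1 + 1).toNat ((n : Int) - 1) rfl (by omega) 0 c
      (by rw [pvQ2_empty mk (n : Int) ((n : Int) - 1 + 1) j (by omega)])
    rw [show (n : Int) - 1 + 1 = (n : Int) from by omega] at hinner
    have hstep := ih (j + 1) (by omega) (by omega)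
      ((PySem.List.pyRange 0 (n : Int) 1).foldl (fun w r =>
        if PySem.List.pyGetD (PySem.List.pyGetD mk r []) j false then
          PySem.List.pySetD w r (PySem.List.pyGetD w r 0 + 1)
        else w) w)
      (c + (((PySem.List.pyRange 0 (n : Int) 1).countP
          (fun i => decide (i < j ∧ pvQ2 mk (n : Int) i j = j - i)) : Nat) : Int))
      hwl' (by
        intro r hr0 hr1
        rw [show j + 1 - 1 = j from by omega]
        exact hwv' r hr0 hr1)
    rw [PySem.List.pyRange_one_cons hjlt, List.foldl_cons, List.map_cons, List.sum_cons]
    simp only [] at hinner hstep ⊢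
    rw [hinner, hstep]
    ring

theorem pvMain (T : List Int)
    (hPre : ∀ v ∈ T, -(T.length : Int) ≤ v ∧ v < (T.length : Int)) :
    solution T = solution_alt T := by
  rcases T with _ | ⟨t0, ts⟩
  · rfl
  · set T := t0 :: ts with hT
    set n : Nat := T.length with hn
    have hn0 : 0 < n := by rw [hn, hT]; simp
    have hlen : PySem.List.len T = (n : Int) := rfl
    set mk0 : List (List Bool) := (PySem.List.pyRange 0 (n : Int) 1).map
      (fun _ => PySem.List.pyRepeat [false] (n : Int)) with hmk0
    set mk : List (List Bool) := (PySem.List.enumerate T 0).foldl pvFoldB mk0 with hmk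
    set M0 : List (List Int) := T.map (fun _ => PySem.List.pyRepeat [(0 : Int)] (n : Int)) with hM0
    set M1 : List (List Int) := (PySem.List.enumerate T 0).foldl pvFoldA M0 with hM1
    set M2 : List (List Int) := (PySem.List.pyRange 0 (n : Int) 1).foldl
      (fun M i => (PySem.List.pyRange 1 (n : Int) 1).foldl (pvBody2 i) M) M1 with hM2
    set M3 : List (List Int) := (PySem.List.pyRange ((n : Int) - 2) (-1) (-1)).foldl
      (fun M i => (PySem.List.pyRange 0 (n : Int) 1).foldl (pvBody3 i) M) M2 with hM3
    set inRow0 : List Int := (PySem.List.pyRange 0 (n : Int) 1).map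
      (fun r => if PySem.List.pyGetD (PySem.List.pyGetD mk r []) 0 false then 1 else 0) with hinRow0
    have hA : solution T = (PySem.List.pyRange 0 ((n : Int) - 1) 1).foldl (fun c i =>
        (PySem.List.pyRange (i + 1) (n : Int) 1).foldl (fun c j =>
          if PySem.List.pyGetD (PySem.List.pyGetD M3 i []) j 0 == j - i then c + 1 else c) c)
        (n : Int) := rfl
    have hB : solution_alt T = ((PySem.List.pyRange 1 (n : Int) 1).foldl (fun st j =>
        let w : List Int := (PySem.List.pyRange 0 (n : Int) 1).foldl (fun w r =>
          if PySem.List.pyGetD (PySem.List.pyGetD mk r []) j false then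
            PySem.List.pySetD w r (PySem.List.pyGetD w r 0 + 1)
          else w) st.1
        let res := (PySem.List.pyRange ((n : Int) - 1) (-1) (-1)).foldl (fun p i =>
          let cnt : Int := p.1 + PySem.List.pyGetD w i 0
          (cnt, if i < j ∧ cnt = j - i then p.2 + 1 else p.2)) ((0 : Int), st.2)
        (w, res.2)) (inRow0, (n : Int))).2 := rfl
    -- stage 0 facts
    have hSh0 : pvSh n M0 := by
      constructor
      · simp [hM0, hn]
      · intro row hrow
        rw [hM0] at hrow
        obtain ⟨x, _, hx⟩ := List.mem_map.1 hrow
        rw [← hx, PySem.List.pyRepeat_singleton]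
        simp
    have hShB0 : pvSh n mk0 := by
      constructor
      · simp [hmk0, PySem.List.length_pyRange_one]
      · intro row hrow
        rw [hmk0] at hrow
        obtain ⟨x, _, hx⟩ := List.mem_map.1 hrow
        rw [← hx, PySem.List.pyRepeat_singleton]
        simp
    have hCell0 : ∀ a b : Int, 0 ≤ a → a < (n : Int) → 0 ≤ b → b < (n : Int) →
        pvCell 0 M0 a b = if pvCell false mk0 a b then 1 else 0 := by
      intro a b ha0 ha1 hb0 hb1
      have hlt : a < (M0.length : Int) := by rw [hSh0.1]; omega
      have hltB : a < (mk0.length : Int) := by rw [hShB0.1]; omega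
      unfold pvCell
      have hrowv : PySem.List.pyGetD M0 a [] = PySem.List.pyRepeat [(0 : Int)] (n : Int) := by
        rw [PySem.List.pyGetD_eq_getElem _ _ ha0 hlt]
        simp only [hM0, List.getElem_map]
      have hrowvB : PySem.List.pyGetD mk0 a [] = PySem.List.pyRepeat [false] (n : Int) := by
        rw [PySem.List.pyGetD_eq_getElem _ _ ha0 hltB]
        simp only [hmk0, List.getElem_map]
      rw [hrowv, hrowvB, PySem.List.pyRepeat_singleton, PySem.List.pyRepeat_singleton]
      have hblt : b < ((List.replicate (n : Int).toNat (0 : Int)).length : Int) := by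
        simp; omega
      have hbltB : b < ((List.replicate (n : Int).toNat false).length : Int) := by
        simp; omega
      rw [PySem.List.pyGetD_eq_getElem _ _ hb0 hblt, PySem.List.pyGetD_eq_getElem _ _ hb0 hbltB]
      simp
    have hEnum : ∀ iv ∈ PySem.List.enumerate T 0,
        0 ≤ iv.1 ∧ iv.1 < (n : Int) ∧ -(n : Int) ≤ iv.2 ∧ iv.2 < (n : Int) := by
      intro iv hiv
      rw [PySem.List.enumerate_eq_map_pyRange T 0] at hiv
      obtain ⟨j, hj, hjv⟩ := List.mem_map.1 hiv
      rw [hlen] at hj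
      have hjr := PySem.List.mem_pyRange_one.1 hj
      have hmem : PySem.List.pyGetD T j 0 ∈ T := by
        apply PySem.List.pyGetD_mem
        simp [PySem.Raise.InRange]
        omega
      have hv := hPre _ hmem
      rw [← hjv]
      exact ⟨hjr.1, hjr.2, hv.1, hv.2⟩
    obtain ⟨hSh1, hShB1, hCell1⟩ := pvStage1 n hn0 (PySem.List.enumerate T 0) M0 mk0
      hSh0 hShB0 hEnum hCell0
    rw [← hM1] at hSh1 hCell1
    rw [← hmk] at hShB1 hCell1
    -- stage 2
    obtain ⟨hSh2, hCell2⟩ := pvOuter2 n mk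
      ((n : Int) - 0).toNat 0 (by omega) (by omega) M1 hSh1
      (by
        intro a b ha0 ha1 hb0 hb1
        rw [hCell1 a b ha0 ha1 hb0 hb1, if_neg (by omega : ¬ a < 0)]
        rfl)
    rw [← hM2] at hSh2 hCell2
    -- stage 3
    obtain ⟨hSh3, hCell3⟩ := pvOuter3 n mk
      (((n : Int) - 2) + 1).toNat ((n : Int) - 2) (by omega) (by omega) M2 hSh2
      (by
        intro a b ha0 ha1 hb0 hb1
        rw [hCell2 a b ha0 ha1 hb0 hb1]
        by_cases h : a ≤ (n : Int) - 2
        · rw [if_pos h]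
        · rw [if_neg h]
          exact (pvQ2_top mk (n : Int) a b (by omega)).symm)
    rw [← hM3] at hSh3 hCell3
    rw [hA, hB]
    -- A's inner loop is a quadrant count
    have hAin : ∀ (c i : Int), 0 ≤ i → i < (n : Int) - 1 →
        (PySem.List.pyRange (i + 1) (n : Int) 1).foldl (fun c j =>
          if PySem.List.pyGetD (PySem.List.pyGetD M3 i []) j 0 == j - i then c + 1 else c) c
        = c + (((PySem.List.pyRange 0 (n : Int) 1).countP
            (fun j => decide (i < j ∧ pvQ2 mk (n : Int) i j = j - i)) : Nat) : Int) := by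
      intro c i hi0 hi1
      rw [PySem.List.foldl_if_add_one]
      have hcc : (PySem.List.pyRange (i + 1) (n : Int) 1).countP
            (fun j => PySem.List.pyGetD (PySem.List.pyGetD M3 i []) j 0 == j - i)
          = (PySem.List.pyRange 0 (n : Int) 1).countP
            (fun j => decide (i < j ∧ pvQ2 mk (n : Int) i j = j - i)) := by
        rw [pvCount_shift _ i (n : Int) hi0 (by omega)]
        refine List.countP_congr ?_
        intro j hj
        have hjr := PySem.List.mem_pyRange_one.1 hj
        have hc3 : PySem.List.pyGetD (PySem.List.pyGetD M3 i []) j 0 = pvQ2 mk (n : Int) i j :=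
          hCell3 i j hi0 (by omega) (by omega) (by omega)
        simp only [Bool.and_eq_true, decide_eq_true_eq, beq_iff_eq, hc3]
      rw [hcc]
    have hAeq : (PySem.List.pyRange 0 ((n : Int) - 1) 1).foldl (fun c i =>
        (PySem.List.pyRange (i + 1) (n : Int) 1).foldl (fun c j =>
          if PySem.List.pyGetD (PySem.List.pyGetD M3 i []) j 0 == j - i then c + 1 else c) c)
        (n : Int)
      = (n : Int) + ((PySem.List.pyRange 0 ((n : Int) - 1) 1).map (fun i =>
          (((PySem.List.pyRange 0 (n : Int) 1).countP
            (fun j => decide (i < j ∧ pvQ2 mk (n : Int) i j = j - i)) : Nat) : Int))).sum := by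
      have hcg := PySem.List.foldl_congr_mem
        (l := PySem.List.pyRange 0 ((n : Int) - 1) 1) (init := ((n : Int) : Int))
        (f := fun c i => (PySem.List.pyRange (i + 1) (n : Int) 1).foldl (fun c j =>
          if PySem.List.pyGetD (PySem.List.pyGetD M3 i []) j 0 == j - i then c + 1 else c) c)
        (g := fun c i => c + (((PySem.List.pyRange 0 (n : Int) 1).countP
            (fun j => decide (i < j ∧ pvQ2 mk (n : Int) i j = j - i)) : Nat) : Int))
        (by
          intro acc i hi
          have hir := PySem.List.mem_pyRange_one.1 hi
          exact hAin acc i hir.1 hir.2)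
      rw [hcg, PySem.List.foldl_add]
    -- B's whole loop via pvOuterB
    have hin0 : ∀ r : Int, 0 ≤ r → r < (n : Int) →
        PySem.List.pyGetD inRow0 r 0 = pvQ1 mk r (1 - 1) := by
      intro r hr0 hr1
      rw [hinRow0]
      rw [PySem.List.pyGetD_map_pyRange_of_nonneg _ (n : Int) r 0 hr0 hr1]
      rw [show (1 : Int) - 1 = 0 from by omega, pvQ1_base mk r]
      rfl
    have hBeq : ((PySem.List.pyRange 1 (n : Int) 1).foldl (fun st j =>
        let w : List Int := (PySem.List.pyRange 0 (n : Int) 1).foldl (fun w r =>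
          if PySem.List.pyGetD (PySem.List.pyGetD mk r []) j false then
            PySem.List.pySetD w r (PySem.List.pyGetD w r 0 + 1)
          else w) st.1
        let res := (PySem.List.pyRange ((n : Int) - 1) (-1) (-1)).foldl (fun p i =>
          let cnt : Int := p.1 + PySem.List.pyGetD w i 0
          (cnt, if i < j ∧ cnt = j - i then p.2 + 1 else p.2)) ((0 : Int), st.2)
        (w, res.2)) (inRow0, (n : Int))).2
      = (n : Int) + ((PySem.List.pyRange 1 (n : Int) 1).map (fun j =>
          (((PySem.List.pyRange 0 (n : Int) 1).countP
            (fun i => decide (i < j ∧ pvQ2 mk (n : Int) i j = j - i)) : Nat) : Int))).sum := by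
      have hlen0 : inRow0.length = n := by
        rw [hinRow0]
        simp [PySem.List.length_pyRange_one]
      exact pvOuterB n mk ((n : Int) - 1).toNat 1 (by omega) (by omega) inRow0 (n : Int)
        hlen0 hin0
    rw [hAeq, hBeq]
    -- reduce both sums to Finset double sums and swap
    have hCnt : ∀ x : Int, (((PySem.List.pyRange 0 (n : Int) 1).countP
          (fun y => decide (x < y ∧ pvQ2 mk (n : Int) x y = y - x)) : Nat) : Int)
        = ∑ k ∈ Finset.range n, (if (x < (k : Int) ∧ pvQ2 mk (n : Int) x k = (k : Int) - x)
            then (1 : Int) else 0) := by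
      intro x
      have := pvCount_pyRange (fun y => decide (x < y ∧ pvQ2 mk (n : Int) x y = y - x)) n 0
      rw [show (0 : Int) + (n : Int) = (n : Int) from by omega] at this
      rw [this]
      refine Finset.sum_congr rfl ?_
      intro k _
      rw [show (0 : Int) + (k : Int) = (k : Int) from by omega]
      simp
    have hCntB : ∀ x : Int, (((PySem.List.pyRange 0 (n : Int) 1).countP
          (fun i => decide (i < x ∧ pvQ2 mk (n : Int) i x = x - i)) : Nat) : Int)
        = ∑ k ∈ Finset.range n, (if ((k : Int) < x ∧ pvQ2 mk (n : Int) k x = x - (k : Int))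
            then (1 : Int) else 0) := by
      intro x
      have := pvCount_pyRange (fun i => decide (i < x ∧ pvQ2 mk (n : Int) i x = x - i)) n 0
      rw [show (0 : Int) + (n : Int) = (n : Int) from by omega] at this
      rw [this]
      refine Finset.sum_congr rfl ?_
      intro k _
      rw [show (0 : Int) + (k : Int) = (k : Int) from by omega]
      simp
    set gA : ℕ → Int := fun i => ∑ j ∈ Finset.range n,
        (if ((i : Int) < (j : Int) ∧ pvQ2 mk (n : Int) i j = (j : Int) - i)
          then (1 : Int) else 0) with hgA
    set gB : ℕ → Int := fun j => ∑ i ∈ Finset.range n,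
        (if ((i : Int) < (j : Int) ∧ pvQ2 mk (n : Int) i j = (j : Int) - i)
          then (1 : Int) else 0) with hgB
    -- A's outer sum
    have hAsum : ((PySem.List.pyRange 0 ((n : Int) - 1) 1).map (fun i =>
          (((PySem.List.pyRange 0 (n : Int) 1).countP
            (fun j => decide (i < j ∧ pvQ2 mk (n : Int) i j = j - i)) : Nat) : Int))).sum
        = ∑ i ∈ Finset.range n, gA i := by
      have hm : (0 : Int) + ((n - 1 : Nat) : Int) = (n : Int) - 1 := by
        push_cast; omega
      rw [show ((n : Int) - 1) = (0 : Int) + ((n - 1 : Nat) : Int) from hm.symm]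
      rw [pvSum_pyRange _ (n - 1) 0]
      have hterm : ∀ k ∈ Finset.range (n - 1),
          (((PySem.List.pyRange 0 (n : Int) 1).countP
            (fun j => decide (((0 : Int) + (k : Int)) < j ∧
              pvQ2 mk (n : Int) ((0 : Int) + (k : Int)) j = j - ((0 : Int) + (k : Int)))) : Nat) : Int)
          = gA k := by
        intro k _
        rw [hCnt ((0 : Int) + (k : Int)), hgA]
        refine Finset.sum_congr rfl ?_
        intro j _
        rw [show (0 : Int) + (k : Int) = (k : Int) from by omega]
      rw [Finset.sum_congr rfl hterm]
      have hzA : gA (n - 1) = 0 := by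
        rw [hgA]
        refine Finset.sum_eq_zero ?_
        intro j hj
        have hjn := Finset.mem_range.1 hj
        rw [if_neg]
        intro h
        have h1 := h.1
        omega
      have hsucc := Finset.sum_range_succ gA (n - 1)
      rw [show n - 1 + 1 = n from by omega] at hsucc
      rw [hsucc, hzA, add_zero]
    -- B's outer sum
    have hBsum : ((PySem.List.pyRange 1 (n : Int) 1).map (fun j =>
          (((PySem.List.pyRange 0 (n : Int) 1).countP
            (fun i => decide (i < j ∧ pvQ2 mk (n : Int) i j = j - i)) : Nat) : Int))).sum
        = ∑ j ∈ Finset.range n, gB j := by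
      have hm : (1 : Int) + ((n - 1 : Nat) : Int) = (n : Int) := by
        push_cast; omega
      rw [show ((n : Int)) = (1 : Int) + ((n - 1 : Nat) : Int) from hm.symm]
      rw [pvSum_pyRange _ (n - 1) 1]
      have hterm : ∀ k ∈ Finset.range (n - 1),
          (((PySem.List.pyRange 0 ((1 : Int) + ((n - 1 : Nat) : Int)) 1).countP
            (fun i => decide (i < ((1 : Int) + (k : Int)) ∧
              pvQ2 mk ((1 : Int) + ((n - 1 : Nat) : Int)) i ((1 : Int) + (k : Int))
                = ((1 : Int) + (k : Int)) - i)) : Nat) : Int)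
          = gB (k + 1) := by
        intro k _
        rw [show (1 : Int) + ((n - 1 : Nat) : Int) = (n : Int) from hm]
        rw [hCntB ((1 : Int) + (k : Int)), hgB]
        refine Finset.sum_congr rfl ?_
        intro i _
        rw [show (1 : Int) + (k : Int) = (((k + 1 : Nat) : Int)) from by push_cast; ring]
      rw [Finset.sum_congr rfl hterm]
      have hzB : gB 0 = 0 := by
        rw [hgB]
        refine Finset.sum_eq_zero ?_
        intro i _
        rw [if_neg]
        intro h
        have h1 := h.1
        omega
      have hsucc := Finset.sum_range_succ' gB (n - 1)
      rw [show n - 1 + 1 = n from by omega] at hsucc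
      rw [hsucc, hzB, add_zero]
    rw [hAsum, hBsum, hgA, hgB, Finset.sum_comm]

-- ===== VERDICT (by name: the statement is the Claim_ definition above) =====
theorem solution_spec : Claim_equal_solution := by
  intro T _ hPre
  show solution T = solution_alt T
  exact pvMain T hPre
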